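-- pv_equiv track=rewrite | github.com/destabilizer/git-data-tools | message_analysis.py | code_tokenize
-- ===== SOURCE A (Python) =====
-- def code_tokenize(txt):
--     tokens = list()
--     cur_word = str()
--     for t in txt:
--         if t.isupper() or not t.isalpha():
--             if cur_word: tokens.append(cur_word)
--             cur_word = t.lower() if t.isalpha() else str()
--         else:
--             cur_word += t
--     else:
--         if cur_word: tokens.append(cur_word)
--     return tokens
-- ===== SOURCE B (Python) =====
-- def code_tokenize(txt):
--     norm = ''.join(
--         ' ' + ch.lower() if ch.isupper() else (ch if ch.isalpha() else ' ')
--         for ch in txt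
--     )
--     return norm.split()
-- ===== Notes on version B (the rewrite author's own statement) =====
-- stated objective: idiomatic
-- what changed: Replaced the explicit state machine with a cur_word accumulator by a per-character normalization map (space before a lowered uppercase, space for non-alpha, letter unchanged) followed by str.split(), which handles all flush/skip-empty logic.
import Mathlib
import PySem

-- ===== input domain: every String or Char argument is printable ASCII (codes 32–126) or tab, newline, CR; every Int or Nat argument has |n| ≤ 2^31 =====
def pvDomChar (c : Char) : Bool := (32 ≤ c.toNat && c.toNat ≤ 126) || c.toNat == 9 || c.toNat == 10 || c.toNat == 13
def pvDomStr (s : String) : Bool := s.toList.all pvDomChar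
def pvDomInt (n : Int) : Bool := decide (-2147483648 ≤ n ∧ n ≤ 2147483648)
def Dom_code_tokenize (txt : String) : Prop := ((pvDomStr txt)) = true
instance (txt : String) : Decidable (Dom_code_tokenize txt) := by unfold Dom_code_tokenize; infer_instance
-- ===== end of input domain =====

-- B replaces A's cur_word state machine by a per-char normalization map followed by split() (idiomatic, same cost).

-- ===== PORT A =====
-- the for-loop over txt: state = (tokens, cur_word); final flush in the [] case ('else:' of the for)
def codeTokLoop : List Char → List (List Char) → List Char → List (List Char)
  | [], tokens, cur => tokens ++ (if cur.isEmpty then [] else [cur])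
  | t :: ts, tokens, cur =>
    if PySem.Chars.isupper t || !PySem.Chars.isalpha t then
      codeTokLoop ts (tokens ++ (if cur.isEmpty then [] else [cur]))
        (if PySem.Chars.isalpha t then [PySem.Chars.lowerChar t] else [])
    else
      codeTokLoop ts tokens (cur ++ [t])

def code_tokenize (txt : String) : List String :=
  (codeTokLoop txt.toList [] []).map String.ofList

-- ===== PORT B =====
-- per-char normalization: ' ' + ch.lower() if upper, ch if alpha, else ' '
def normChar (c : Char) : List Char :=
  if PySem.Chars.isupper c then [' ', PySem.Chars.lowerChar c]
  else if !PySem.Chars.isalpha c then [' ']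
  else [c]

def code_tokenize_alt (txt : String) : List String :=
  PySem.Str.split₀ (String.ofList (txt.toList.flatMap normChar))

-- ===== PRECONDITION & SPEC =====
def Spec_code_tokenize (txt : String) (out : List String) : Prop := out = code_tokenize_alt txt
instance (txt : String) (out : List String) : Decidable (Spec_code_tokenize txt out) := by unfold Spec_code_tokenize; infer_instance

-- ===== CLAIM (what is proved, stated in full; the proofs are below) =====
def Claim_equal_code_tokenize : Prop := ∀ (txt : String), Dom_code_tokenize txt → Spec_code_tokenize txt (code_tokenize txt)

-- ===== LEMMAS AND PROOFS =====

lemma split0_go_nil (cur : List Char) (acc : List (List Char)) :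
    PySem.Chars.split₀.go [] cur acc
      = if cur.isEmpty then acc.reverse else (cur.reverse :: acc).reverse := by
  rw [PySem.Chars.split₀.go]

lemma split0_go_cons (c : Char) (rest cur : List Char) (acc : List (List Char)) :
    PySem.Chars.split₀.go (c :: rest) cur acc
      = if PySem.Chars.isspace c then
          (if cur.isEmpty then PySem.Chars.split₀.go rest [] acc
           else PySem.Chars.split₀.go rest [] (cur.reverse :: acc))
        else PySem.Chars.split₀.go rest (c :: cur) acc := by
  rw [PySem.Chars.split₀.go]

lemma not_isspace_of_islower {c : Char} (h : PySem.Chars.islower c = true) :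
    PySem.Chars.isspace c = false := by
  simp [PySem.Chars.islower, Char.le_def, UInt32.le_iff_toNat_le] at h
  simp [PySem.Chars.isspace]
  omega

lemma islower_lowerChar_of_isupper {c : Char} (h : PySem.Chars.isupper c = true) :
    PySem.Chars.islower (PySem.Chars.lowerChar c) = true := by
  simp [PySem.Chars.isupper, Char.le_def, UInt32.le_iff_toNat_le] at h
  have hv : Nat.isValidChar (c.toNat + 32) := Or.inl (by omega)
  have ht : (Char.ofNat (c.toNat + 32)).toNat = c.toNat + 32 := by
    rw [Char.toNat_ofNat, if_pos hv]
  simp [PySem.Chars.lowerChar, PySem.Chars.isupper, Char.le_def, UInt32.le_iff_toNat_le, h,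
        PySem.Chars.islower, ht]

lemma split₀_go_eq_loop (cs : List Char) :
    ∀ (cur : List Char) (acc : List (List Char)),
      PySem.Chars.split₀.go (cs.flatMap normChar) cur acc
        = codeTokLoop cs acc.reverse cur.reverse := by
  induction cs with
  | nil =>
      intro cur acc
      rw [List.flatMap_nil, split0_go_nil]
      by_cases h : cur.isEmpty <;> simp [codeTokLoop, h]
  | cons c cs ih =>
      intro cur acc
      by_cases hu : PySem.Chars.isupper c = true
      · have hsp : PySem.Chars.isspace (PySem.Chars.lowerChar c) = false :=
          not_isspace_of_islower (islower_lowerChar_of_isupper hu)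
        have ha : PySem.Chars.isalpha c = true := by simp [PySem.Chars.isalpha, hu]
        have hspc : PySem.Chars.isspace ' ' = true := by decide
        rw [List.flatMap_cons]
        simp only [normChar, hu, if_true, List.cons_append, List.nil_append]
        rw [split0_go_cons, if_pos hspc]
        by_cases hc : cur.isEmpty
        · rw [if_pos hc, split0_go_cons, if_neg (by simp [hsp]), ih]
          simp [codeTokLoop, hu, ha, hc]
        · rw [if_neg hc, split0_go_cons, if_neg (by simp [hsp]), ih]
          simp [codeTokLoop, hu, ha, hc]
      · by_cases ha : PySem.Chars.isalpha c = true
        · -- lowercase letter: passed through unchanged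
          have hl : PySem.Chars.islower c = true := by
            simp [PySem.Chars.isalpha, hu] at ha; exact ha
          have hsp : PySem.Chars.isspace c = false := not_isspace_of_islower hl
          rw [List.flatMap_cons]
          simp only [normChar, hu, ha, if_false, Bool.not_true, Bool.false_eq_true,
            List.cons_append, List.nil_append]
          rw [split0_go_cons, if_neg (by simp [hsp]), ih]
          simp [codeTokLoop, hu, ha]
        · -- non-alpha: becomes a separator
          have hspc : PySem.Chars.isspace ' ' = true := by decide
          rw [List.flatMap_cons]
          simp only [normChar, hu, if_false, Bool.false_eq_true, Bool.not_eq_true']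
          rw [show (if PySem.Chars.isalpha c = false then [' '] else [c]) = [' '] from by
                simp [ha], List.cons_append, List.nil_append]
          rw [split0_go_cons, if_pos hspc]
          by_cases hc : cur.isEmpty
          · rw [if_pos hc, ih]; simp [codeTokLoop, hu, ha, hc]
          · rw [if_neg hc, ih]; simp [codeTokLoop, hu, ha, hc]

-- ===== VERDICT (by name: the statement is the Claim_ definition above) =====
theorem code_tokenize_spec : Claim_equal_code_tokenize := by
  intro txt _
  unfold Spec_code_tokenize code_tokenize code_tokenize_alt
  rw [PySem.Str.split₀]
  simp only [String.toList_ofList]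
  rw [PySem.Chars.split₀, split₀_go_eq_loop]
  simp
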